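-- pv_equiv track=rewrite | github.com/scorixear/EverybodyCodes | 2025/16/3.py | identify_spell
-- ===== SOURCE A (Python) =====
-- def identify_spell(columns: list[int]):
--     numbers = []
--     for i in range(0, len(columns)):
--         fits = True
--         new_columns = columns.copy()
--         for j in range(i, len(columns), i + 1):
--             if columns[j] == 0:
--                 fits = False
--                 break
--             new_columns[j] -= 1
--         if fits:
--             numbers.append(i + 1)
--             columns = new_columns
--     return numbers
-- ===== SOURCE B (Python) =====
-- def identify_spell(columns):
--     # Stateless reformulation: never mutates any column state. Step s is cast
--     # iff every stride position p (1-indexed multiples of s) still has charge,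
--     # where the current charge is the original value minus the number of
--     # previously cast steps that divide p.
--     n = len(columns)
--     numbers = []
--     for s in range(1, n + 1):
--         if all(columns[p - 1] != sum(1 for t in numbers if p % t == 0)
--                for p in range(s, n + 1, s)):
--             numbers.append(s)
--     return numbers
-- ===== Notes on version B (the rewrite author's own statement) =====
-- stated objective: alternative
-- what changed: B is stateless: A simulates the casting by copying the whole column list every iteration and committing decrements into it, while B never copies or mutates any list - it recomputes each stride position's current value as the original column value minus the count of already-cast steps that divide the position.
import Mathlib
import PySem

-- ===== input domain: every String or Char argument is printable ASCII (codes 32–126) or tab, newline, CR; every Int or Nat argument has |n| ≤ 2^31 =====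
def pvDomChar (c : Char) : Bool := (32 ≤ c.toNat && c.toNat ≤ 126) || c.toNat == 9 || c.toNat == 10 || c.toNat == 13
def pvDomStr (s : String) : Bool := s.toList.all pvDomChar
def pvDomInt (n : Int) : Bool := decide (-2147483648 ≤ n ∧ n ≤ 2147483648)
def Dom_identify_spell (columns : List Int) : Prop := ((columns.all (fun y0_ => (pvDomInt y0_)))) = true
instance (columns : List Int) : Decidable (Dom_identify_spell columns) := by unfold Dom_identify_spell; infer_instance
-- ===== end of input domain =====

-- B is a stateless reformulation (objective: alternative): it never copies or mutates a
-- column array; each check recomputes a position's current value as the original value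
-- minus the number of already-cast steps dividing the position.

-- ===== PORT A =====
-- inner loop of A: j over the stride indices; break (none = 'fits = False') on a zero in
-- the CURRENT columns, else decrement position j of the working copy. All stride indices
-- are in range, so pyGetD/pySetD are exact here.
def pvAInner (cols : List Int) : List Int → List Int → Option (List Int)
  | [], newc => some newc
  | j :: rest, newc =>
    if PySem.List.pyGetD cols j 0 == 0 then none
    else pvAInner cols rest (PySem.List.pySetD newc j (PySem.List.pyGetD newc j 0 - 1))

-- one iteration of A's outer loop: state = (numbers, current columns binding)
def pvAStep (st : List Int × List Int) (i : Int) : List Int × List Int :=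
  match pvAInner st.2 (PySem.List.pyRange i (st.2.length : Int) (i + 1)) st.2 with
  | none => st
  | some nc => (st.1 ++ [i + 1], nc)

def identify_spell (columns : List Int) : List Int :=
  ((PySem.List.pyRange 0 (columns.length : Int) 1).foldl pvAStep
    (([] : List Int), columns)).1

-- ===== PORT B =====
-- sum(1 for t in numbers if p % t == 0)
def pvCastCount (numbers : List Int) (p : Int) : Int :=
  numbers.foldl (fun c t => if PySem.Int.mod p t == 0 then c + 1 else c) 0

-- one iteration of B's loop over the candidate step s
def pvBStep (columns : List Int) (numbers : List Int) (s : Int) : List Int :=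
  if (PySem.List.pyRange s ((columns.length : Int) + 1) s).all
      (fun p => PySem.List.pyGetD columns (p - 1) 0 != pvCastCount numbers p) then
    numbers ++ [s]
  else numbers

def identify_spell_alt (columns : List Int) : List Int :=
  (PySem.List.pyRange 1 ((columns.length : Int) + 1) 1).foldl
    (pvBStep columns) []

-- ===== PRECONDITION & SPEC =====
def Spec_identify_spell (columns : List Int) (out : List Int) : Prop := out = identify_spell_alt columns
instance (columns : List Int) (out : List Int) : Decidable (Spec_identify_spell columns out) := by unfold Spec_identify_spell; infer_instance

-- ===== CLAIM (what is proved, stated in full; the proofs are below) =====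
def Claim_equal_identify_spell : Prop := ∀ (columns : List Int), Dom_identify_spell columns → Spec_identify_spell columns (identify_spell columns)

-- ===== LEMMAS AND PROOFS =====

-- A's break-on-zero inner loop = "check all stride positions, then decrement them"
theorem pvAInner_eq (cols : List Int) (idxs : List Int) (acc : List Int) :
    pvAInner cols idxs acc =
      if idxs.all (fun j => PySem.List.pyGetD cols j 0 != 0) then
        some (idxs.foldl (fun c j => PySem.List.pySetD c j (PySem.List.pyGetD c j 0 - 1)) acc)
      else none := by
  induction idxs generalizing acc with
  | nil => simp [pvAInner]
  | cons j rest ih =>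
    simp only [pvAInner, List.all_cons, List.foldl_cons, ih]
    by_cases h : PySem.List.pyGetD cols j 0 = 0 <;> simp [h]

-- B's divisor count is a countP of the divisibility predicate
theorem pvCastCount_eq (nums : List Int) (p : Int) :
    pvCastCount nums p = (nums.countP (fun t => decide (t ∣ p)) : Int) := by
  unfold pvCastCount
  rw [PySem.List.foldl_if_add_one (fun t => PySem.Int.mod p t == 0) nums 0]
  have hcp : List.countP (fun t => PySem.Int.mod p t == 0) nums
      = List.countP (fun t => decide (t ∣ p)) nums :=
    List.countP_congr (fun t _ => by simp [PySem.Int.mod_eq_zero_iff_dvd])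
  rw [hcp]
  simp

-- length is preserved by the decrement fold
theorem pvDec_length (L : List Int) (cols : List Int) :
    (L.foldl (fun c x => PySem.List.pySetD c x (PySem.List.pyGetD c x 0 - 1)) cols).length
      = cols.length := by
  induction L generalizing cols with
  | nil => rfl
  | cons x L' ih => simp [List.foldl_cons, ih, PySem.List.length_pySetD]

-- pointwise effect of the decrement fold: subtract the multiplicity of the index
theorem pvDec_getD (L : List Int) (cols : List Int) (j : Nat)
    (hL : ∀ x ∈ L, 0 ≤ x) (hj : j < cols.length) :
    (L.foldl (fun c x => PySem.List.pySetD c x (PySem.List.pyGetD c x 0 - 1)) cols).getD j 0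
      = cols.getD j 0 - L.count ((j : Nat) : Int) := by
  induction L generalizing cols with
  | nil => simp
  | cons x L' ih =>
    have hx : 0 ≤ x := hL x (List.mem_cons_self)
    have hxc : x = ((x.toNat : Nat) : Int) := (Int.toNat_of_nonneg hx).symm
    simp only [List.foldl_cons]
    rw [hxc, PySem.List.pyGetD_natCast, PySem.List.pySetD_natCast]
    rw [ih _ (fun y hy => hL y (List.mem_cons_of_mem _ hy)) (by simpa using hj)]
    rw [hxc, List.count_cons]
    simp only [Int.toNat_natCast]
    have hset : (cols.set x.toNat (cols.getD x.toNat 0 - 1)).getD j 0 =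
        if x.toNat = j ∧ x.toNat < cols.length then cols.getD j 0 - 1 else cols.getD j 0 := by
      simp only [List.getD, List.getElem?_set]
      by_cases h1 : x.toNat = j
      · subst h1
        by_cases h2 : x.toNat < cols.length
        · simp [h2]
        · simp [h2]
      · simp [h1]
    rw [hset]
    by_cases h1 : x.toNat = j
    · simp [h1, hj]
      omega
    · have hbeq : (((x.toNat : Nat) : Int) == ((j : Nat) : Int)) = false := by
        simp
        omega
      have hcond : ¬ (x.toNat = j ∧ x.toNat < cols.length) := fun h => h1 h.1
      simp only [hcond, if_false, hbeq]
      push_cast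
      omega

-- the stride of step i+1 starting at i has no duplicates
theorem pvStride_nodup (i b : Int) (hi : 0 ≤ i) :
    (PySem.List.pyRange i b (i+1)).Nodup := by
  rw [PySem.List.pyRange_of_pos i b (by omega)]
  refine List.Nodup.map ?_ List.nodup_range
  intro a b hab
  simp only at hab
  have h2 := mul_left_cancel₀ (show (i : Int) + 1 ≠ 0 by omega) (add_left_cancel hab)
  exact_mod_cast h2

-- membership in A's stride is divisibility of the 1-indexed position
theorem pvMemStride (i : Int) (hi : 0 ≤ i) (n : Nat) (j : Nat) (hj : j < n) :
    ((j : Nat) : Int) ∈ PySem.List.pyRange i (n : Int) (i+1) ↔ (i+1) ∣ (((j : Nat) : Int) + 1) := by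
  rw [PySem.List.mem_pyRange_iff_of_pos (by omega)]
  constructor
  · rintro ⟨h1, h2, h3⟩
    have : ((j:Int) + 1) = ((j:Int) - i) + (i + 1) := by ring
    rw [this]
    exact Dvd.dvd.add h3 dvd_rfl
  · intro hdvd
    have hle : i + 1 ≤ (j:Int) + 1 := Int.le_of_dvd (by omega) hdvd
    refine ⟨by omega, by exact_mod_cast hj, ?_⟩
    have : ((j:Int) - i) = ((j:Int) + 1) - (i + 1) := by ring
    rw [this]
    exact dvd_sub hdvd dvd_rfl

-- A's acceptance test on the current columns = B's stateless test on the original columns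
theorem pvCond_eq (columns cols nums : List Int) (i : Int) (hi : 0 ≤ i)
    (hlen : cols.length = columns.length)
    (hval : ∀ j : Nat, j < columns.length →
        cols.getD j 0 = columns.getD j 0 - (nums.countP (fun t => decide (t ∣ ((j : Int) + 1))) : Int)) :
    ((PySem.List.pyRange i (cols.length : Int) (i+1)).all
        (fun j => PySem.List.pyGetD cols j 0 != 0))
    = ((PySem.List.pyRange (i+1) ((columns.length : Int) + 1) (i+1)).all
        (fun p => PySem.List.pyGetD columns (p - 1) 0 != pvCastCount nums p)) := by
  rw [Bool.eq_iff_iff]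
  simp only [List.all_eq_true, bne_iff_ne, ne_eq]
  constructor
  · intro hA p hp
    rw [PySem.List.mem_pyRange_iff_of_pos (by omega)] at hp
    obtain ⟨h1, h2, h3⟩ := hp
    set j : Nat := (p - 1).toNat with hjdef
    have hpj : ((j : Nat) : Int) = p - 1 := Int.toNat_of_nonneg (by omega)
    have hjn : j < columns.length := by omega
    have hmem : ((j : Nat) : Int) ∈ PySem.List.pyRange i (cols.length : Int) (i+1) := by
      rw [PySem.List.mem_pyRange_iff_of_pos (by omega)]
      refine ⟨by omega, by omega, ?_⟩
      have : ((j:Int)) - i = p - (i + 1) := by omega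
      rw [this]; exact h3
    have hA' := hA _ hmem
    rw [PySem.List.pyGetD_natCast] at hA'
    rw [hval j hjn] at hA'
    have hpe : p = ((j : Nat) : Int) + 1 := by omega
    rw [show p - 1 = ((j : Nat) : Int) from by omega, PySem.List.pyGetD_natCast,
      hpe, pvCastCount_eq]
    omega
  · intro hB x hx
    have hx' := hx
    rw [PySem.List.mem_pyRange_iff_of_pos (by omega)] at hx'
    obtain ⟨h1, h2, h3⟩ := hx'
    set j : Nat := x.toNat with hjdef
    have hxj : ((j : Nat) : Int) = x := Int.toNat_of_nonneg (by omega)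
    have hjn : j < columns.length := by omega
    have hmem : x + 1 ∈ PySem.List.pyRange (i+1) ((columns.length : Int) + 1) (i+1) := by
      rw [PySem.List.mem_pyRange_iff_of_pos (by omega)]
      refine ⟨by omega, by omega, ?_⟩
      have : x + 1 - (i + 1) = x - i := by ring
      rw [this]; exact h3
    have hB' := hB _ hmem
    rw [show x + 1 - 1 = ((j : Nat) : Int) from by omega, PySem.List.pyGetD_natCast,
      pvCastCount_eq] at hB'
    rw [← hxj, PySem.List.pyGetD_natCast, hval j hjn]
    rw [show x + 1 = ((j : Nat) : Int) + 1 from by omega] at hB'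
    omega

-- main loop coupling: A's (numbers, columns) state vs B's numbers-only state,
-- with the invariant  cols[j] = columns[j] - #(cast steps dividing j+1)
theorem pvLoop (columns : List Int) (K : List Int) (nums cols : List Int)
    (hK : ∀ i ∈ K, 0 ≤ i)
    (hlen : cols.length = columns.length)
    (hval : ∀ j : Nat, j < columns.length →
        cols.getD j 0 = columns.getD j 0 - (nums.countP (fun t => decide (t ∣ ((j : Int) + 1))) : Int)) :
    (K.foldl pvAStep (nums, cols)).1
      = K.foldl (fun ns i => pvBStep columns ns (i + 1)) nums := by
  induction K generalizing nums cols with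
  | nil => rfl
  | cons i K' ih =>
    have hi : 0 ≤ i := hK i List.mem_cons_self
    have hKtail : ∀ x ∈ K', 0 ≤ x := fun x hx => hK x (List.mem_cons_of_mem _ hx)
    simp only [List.foldl_cons]
    have hstep : pvAStep (nums, cols) i =
        if (PySem.List.pyRange (i+1) ((columns.length : Int) + 1) (i+1)).all
            (fun p => PySem.List.pyGetD columns (p - 1) 0 != pvCastCount nums p) then
          (nums ++ [i + 1],
           (PySem.List.pyRange i (cols.length : Int) (i+1)).foldl
             (fun c j => PySem.List.pySetD c j (PySem.List.pyGetD c j 0 - 1)) cols)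
        else (nums, cols) := by
      unfold pvAStep
      rw [pvAInner_eq, pvCond_eq columns cols nums i hi hlen hval]
      by_cases hb : (PySem.List.pyRange (i+1) ((columns.length : Int) + 1) (i+1)).all
          (fun p => PySem.List.pyGetD columns (p - 1) 0 != pvCastCount nums p) <;> simp [hb]
    rw [hstep]
    unfold pvBStep
    by_cases hb : (PySem.List.pyRange (i+1) ((columns.length : Int) + 1) (i+1)).all
        (fun p => PySem.List.pyGetD columns (p - 1) 0 != pvCastCount nums p)
    · simp only [hb, if_true]
      set L := PySem.List.pyRange i (cols.length : Int) (i+1) with hL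
      set cols' := L.foldl (fun c j => PySem.List.pySetD c j (PySem.List.pyGetD c j 0 - 1)) cols with hcols'
      refine ih (nums ++ [i + 1]) cols' hKtail ?_ ?_
      · rw [hcols', pvDec_length, hlen]
      · intro j hj
        have hLpos : ∀ x ∈ L, 0 ≤ x := by
          intro x hx
          rw [hL, PySem.List.mem_pyRange_iff_of_pos (by omega)] at hx
          omega
        rw [hcols', pvDec_getD L cols j hLpos (by omega)]
        rw [hval j hj]
        have hnodup : L.Nodup := pvStride_nodup i _ hi
        have hcount : L.count ((j : Nat) : Int)
            = if (i+1) ∣ (((j : Nat) : Int) + 1) then 1 else 0 := by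
          by_cases hd : (i+1) ∣ (((j : Nat) : Int) + 1)
          · rw [if_pos hd]
            refine List.count_eq_one_of_mem hnodup ?_
            rw [hL, hlen]
            exact (pvMemStride i hi columns.length j hj).mpr hd
          · rw [if_neg hd]
            refine List.count_eq_zero_of_not_mem ?_
            rw [hL, hlen]
            intro hmem
            exact hd ((pvMemStride i hi columns.length j hj).mp hmem)
        rw [hcount]
        rw [List.countP_append]
        simp only [List.countP_cons, List.countP_nil]
        by_cases hd : (i+1) ∣ (((j : Nat) : Int) + 1) <;> simp [hd] <;> omega
    · simp only [hb]
      exact ih nums cols hKtail hlen hval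

-- B's range of steps 1..n is the shift of A's range of indices 0..n-1
theorem pvRangeShift (n : Nat) :
    PySem.List.pyRange 1 ((n : Int) + 1) 1 = (PySem.List.pyRange 0 (n : Int) 1).map (· + 1) := by
  simp [PySem.List.pyRange_one, List.map_map]
  intro k hk
  ring

-- ===== VERDICT (by name: the statement is the Claim_ definition above) =====
theorem identify_spell_spec : Claim_equal_identify_spell := by
  intro columns _
  unfold Spec_identify_spell identify_spell identify_spell_alt
  rw [pvRangeShift columns.length, List.foldl_map]
  refine pvLoop columns _ [] columns ?_ rfl ?_
  · intro i hi
    rw [PySem.List.mem_pyRange_one] at hi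
    exact hi.1
  · intro j hj
    simp
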